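-- pv_equiv track=rewrite | github.com/sangjinCHOI/algostudy | 0125/SMG/비밀지도/s1.py | solution
-- ===== SOURCE A (Python) =====
-- def solution(n, arr1, arr2):
--     answer = []
--     binary1 = []
--     binary2 = []
--     result = [[0]*n for _ in range(n)]
--     for i in arr1:
--         temp = bin(i)[2:]
--         if len(temp) == n:
--             binary1.append(bin(i)[2:])
--         else:
--             while len(temp) < n:
--                 temp = '0' + temp
--             binary1.append(temp)
--     for i in arr2:
--         temp = bin(i)[2:]
--         if len(temp) == n:
--             binary2.append(bin(i)[2:])
--         else:
--             while len(temp) < n: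
--                 temp = '0' + temp
--             binary2.append(temp)
--     for i in range(n):
--         for j in range(n):
--             if binary2[i][j] == '1' or binary1[i][j] == '1':
--                 result[i][j] = 1
--     for i in result:
--         temp = ''
--         for j in i:
--             if j == 1:
--                 temp += '#'
--             else:
--                 temp += ' '
--         answer.append(temp)
--
--     return answer
-- ===== SOURCE B (Python) =====
-- def solution(n, arr1, arr2):
--     answer = []
--     for i in range(n):
--         s1 = bin(arr1[i])[2:].zfill(n)
--         s2 = bin(arr2[i])[2:].zfill(n)
--         row = ''.join('#' if (c1 == '1' or c2 == '1') else ' '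
--                       for c1, c2 in zip(s1[:n], s2[:n]))
--         answer.append(row)
--     return answer
-- ===== Notes on version B (the rewrite author's own statement) =====
-- stated objective: faster
-- what changed: B replaces A's four passes (two padded-binary-string lists, an n-by-n 0/1 grid filled by nested index loops, then a grid-to-string pass) with a single loop over the n rows that pads the two binary strings and zips their first n characters directly into the row string.
-- outside the precondition, e.g. on solution(2, [-62], [-31, 62, 3, -61, -70, 26, 16]): A returns [' #', '##'], B raises IndexError
import Mathlib
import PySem

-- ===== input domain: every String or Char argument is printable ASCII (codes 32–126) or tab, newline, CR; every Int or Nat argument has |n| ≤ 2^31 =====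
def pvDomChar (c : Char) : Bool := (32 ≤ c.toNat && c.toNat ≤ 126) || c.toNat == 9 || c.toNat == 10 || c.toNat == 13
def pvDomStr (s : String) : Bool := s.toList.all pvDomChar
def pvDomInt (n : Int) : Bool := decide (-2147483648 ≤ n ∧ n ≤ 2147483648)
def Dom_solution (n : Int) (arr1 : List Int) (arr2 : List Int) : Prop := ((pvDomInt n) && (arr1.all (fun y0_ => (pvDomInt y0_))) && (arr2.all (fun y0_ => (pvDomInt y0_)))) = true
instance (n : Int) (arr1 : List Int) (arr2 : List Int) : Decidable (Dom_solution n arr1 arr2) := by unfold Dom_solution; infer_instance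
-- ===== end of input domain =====

-- B replaces A's four passes (two binary-string lists, an n×n 0/1 grid filled by nested index
-- loops, then a grid-to-string pass) by a single loop over the rows that pads the two binary
-- strings and zips them into the row string directly; same return value on Pre_.

-- ===== PORT A =====
-- while len(temp) < n: temp = '0' + temp
def padA (n : Int) (t : List Char) : List Char :=
  if (t.length : Int) < n then padA n ('0' :: t) else t
termination_by (n - t.length).toNat
decreasing_by simp; omega

-- temp = bin(i)[2:]; if len(temp) == n: … else: pad
def binEntryA (n : Int) (i : Int) : List Char :=
  if ((PySem.List.slice (PySem.Int.toBinChars0b i) (some 2) none).length : Int) = n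
  then PySem.List.slice (PySem.Int.toBinChars0b i) (some 2) none
  else padA n (PySem.List.slice (PySem.Int.toBinChars0b i) (some 2) none)

def solution (n : Int) (arr1 : List Int) (arr2 : List Int) : List String :=
  let binary1 := arr1.foldl (fun acc i => acc ++ [binEntryA n i]) []
  let binary2 := arr2.foldl (fun acc i => acc ++ [binEntryA n i]) []
  let result : List (List Int) := List.replicate n.toNat (List.replicate n.toNat 0)
  -- nested loops 'for i in range(n): for j in range(n): if …: result[i][j] = 1';
  -- list indexing ported with getD (exact under Pre_, where every index is in range)
  let result := (List.range n.toNat).foldl (fun res i =>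
      (List.range n.toNat).foldl (fun res j =>
        if ((binary2.getD i []).getD j ' ' = '1') ∨ ((binary1.getD i []).getD j ' ' = '1')
        then res.set i ((res.getD i []).set j 1) else res) res) result
  result.foldl (fun ans row =>
    ans ++ [String.mk (row.foldl (fun t j => t ++ [if j = 1 then '#' else ' ']) [])]) []

-- ===== PORT B =====
-- s1 = bin(arr1[i])[2:].zfill(n); s2 likewise; row from zip(s1[:n], s2[:n])
def rowB (n : Int) (a : Int) (b : Int) : List Char :=
  ((PySem.List.slice (PySem.Chars.zfill (PySem.List.slice (PySem.Int.toBinChars0b a) (some 2) none) n) none (some n)).zip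
    (PySem.List.slice (PySem.Chars.zfill (PySem.List.slice (PySem.Int.toBinChars0b b) (some 2) none) n) none (some n))).map
    (fun p => if p.1 = '1' ∨ p.2 = '1' then '#' else ' ')

def solution_alt (n : Int) (arr1 : List Int) (arr2 : List Int) : List String :=
  (List.range n.toNat).foldl (fun ans i =>
    ans ++ [String.mk (rowB n (arr1.getD i 0) (arr2.getD i 0))]) []

-- ===== PRECONDITION & SPEC =====
-- Pre_ excludes the inputs where some row i < n is missing from arr1 or arr2: there A raises
-- IndexError, except when arr1 alone is short and every inspected arr2 bit happens to be '1',
-- where A returns a value only thanks to accidental 'or' short-circuiting; B raises on all of them.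
def Pre_solution (n : Int) (arr1 : List Int) (arr2 : List Int) : Prop :=
  n ≤ (arr1.length : Int) ∧ n ≤ (arr2.length : Int)
instance (n : Int) (arr1 : List Int) (arr2 : List Int) : Decidable (Pre_solution n arr1 arr2) := by
  unfold Pre_solution; infer_instance

def pvWitness_solution : Int × List Int × List Int := (2, [2, 1], [1, 3])

def Spec_solution (n : Int) (arr1 : List Int) (arr2 : List Int) (out : List String) : Prop := out = solution_alt n arr1 arr2
instance (n : Int) (arr1 : List Int) (arr2 : List Int) (out : List String) : Decidable (Spec_solution n arr1 arr2 out) := by unfold Spec_solution; infer_instance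

-- ===== CLAIM (what is proved, stated in full; the proofs are below) =====
def Claim_equal_solution : Prop := ∀ (n : Int) (arr1 : List Int) (arr2 : List Int), Dom_solution n arr1 arr2 → Pre_solution n arr1 arr2 → Spec_solution n arr1 arr2 (solution n arr1 arr2)

-- ===== LEMMAS AND PROOFS =====

lemma digitChar_ne_sign (k : Nat) (hk : k < 2) :
    Nat.digitChar k ≠ '+' ∧ Nat.digitChar k ≠ '-' := by
  interval_cases k <;> exact ⟨by decide, by decide⟩

lemma toDigitsCore_not_sign (fuel n : Nat) (ds : List Char)
    (h1 : '+' ∉ ds) (h2 : '-' ∉ ds) :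
    '+' ∉ Nat.toDigitsCore 2 fuel n ds ∧ '-' ∉ Nat.toDigitsCore 2 fuel n ds := by
  induction fuel generalizing n ds with
  | zero => exact ⟨h1, h2⟩
  | succ f ih =>
    have hd := digitChar_ne_sign (n % 2) (by omega)
    simp only [Nat.toDigitsCore]
    split
    · refine ⟨?_, ?_⟩ <;> intro hmem <;> rcases List.mem_cons.mp hmem with h | h
      · exact hd.1 h.symm
      · exact h1 h
      · exact hd.2 h.symm
      · exact h2 h
    · refine ih _ _ ?_ ?_ <;> intro hmem <;> rcases List.mem_cons.mp hmem with h | h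
      · exact hd.1 h.symm
      · exact h1 h
      · exact hd.2 h.symm
      · exact h2 h

lemma toDigits_not_sign (m : Nat) : '+' ∉ Nat.toDigits 2 m ∧ '-' ∉ Nat.toDigits 2 m :=
  toDigitsCore_not_sign (m + 1) m [] (by simp) (by simp)

-- the zfill of a string with no sign character is a plain left pad
lemma zfill_eq_pad (cs : List Char) (w : Int) (h1 : '+' ∉ cs) (h2 : '-' ∉ cs) :
    PySem.Chars.zfill cs w = List.replicate (w.toNat - cs.length) '0' ++ cs := by
  unfold PySem.Chars.zfill
  split
  · have h : w.toNat - cs.length = 0 := by omega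
    simp [h]
  · match cs with
    | [] => simp
    | c :: rest =>
      have hc : ¬ (c = '+' ∨ c = '-') := by
        rintro (rfl | rfl)
        · exact h1 List.mem_cons_self
        · exact h2 List.mem_cons_self
      simp [hc]

-- padA is the same left pad
lemma padA_eq_pad (n : Int) (t : List Char) :
    padA n t = List.replicate (n.toNat - t.length) '0' ++ t := by
  fun_induction padA n t with
  | case1 t ht ih =>
    rw [ih]
    have h : n.toNat - t.length = (n.toNat - ('0' :: t).length) + 1 := by
      simp only [List.length_cons]; omega
    rw [h, List.replicate_succ']
    simp
  | case2 t ht =>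
    have h : n.toNat - t.length = 0 := by omega
    simp [h]

-- bin(i)[2:] contains no sign character ('b'-prefixed for negative i, binary digits otherwise)
lemma binTail_not_sign (i : Int) :
    '+' ∉ PySem.List.slice (PySem.Int.toBinChars0b i) (some 2) none ∧
    '-' ∉ PySem.List.slice (PySem.Int.toBinChars0b i) (some 2) none := by
  unfold PySem.Int.toBinChars0b
  rw [show ((2 : Int) = ((2 : Nat) : Int)) by norm_num, PySem.List.slice_from_natCast]
  split
  · simpa using toDigits_not_sign i.natAbs
  · simpa using toDigits_not_sign i.toNat

-- A's padded entry is exactly B's zfill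
lemma binEntryA_eq_zfill (n : Int) (i : Int) :
    binEntryA n i
      = PySem.Chars.zfill (PySem.List.slice (PySem.Int.toBinChars0b i) (some 2) none) n := by
  unfold binEntryA
  rw [zfill_eq_pad _ _ (binTail_not_sign i).1 (binTail_not_sign i).2, padA_eq_pad]
  split
  · rename_i h
    have h0 : n.toNat - (PySem.List.slice (PySem.Int.toBinChars0b i) (some 2) none).length = 0 := by
      omega
    simp [h0]
  · rfl

lemma length_binEntryA (n : Int) (i : Int) : n.toNat ≤ (binEntryA n i).length := by
  rw [binEntryA_eq_zfill, PySem.Chars.length_zfill]; omega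

-- a foldl whose body preserves length preserves length
lemma foldl_length_invariant {α β : Type} (f : List α → β → List α) (l : List β)
    (h : ∀ acc b, (f acc b).length = acc.length) (acc : List α) :
    (l.foldl f acc).length = acc.length := by
  induction l generalizing acc with
  | nil => rfl
  | cons x xs ih => rw [List.foldl_cons, ih, h]

-- row-level loop 'for j in range(m): if c j: r[j] = 1', elementwise
lemma rowFold_getD (c : Nat → Prop) [DecidablePred c] (m : Nat) (r : List Int) (j : Nat)
    (hj : j < r.length) :
    ((List.range m).foldl (fun r j => if c j then r.set j 1 else r) r).getD j 0
      = if c j ∧ j < m then 1 else r.getD j 0 := by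
  induction m with
  | zero => simp
  | succ m ih =>
    rw [List.range_succ, List.foldl_append]
    simp only [List.foldl_cons, List.foldl_nil]
    have hlen : ((List.range m).foldl (fun r j => if c j then r.set j 1 else r) r).length
        = r.length :=
      foldl_length_invariant _ _ (by intro acc b; split <;> simp) r
    split
    · rename_i hcm
      rw [List.getD_eq_getElem _ _ (by rw [List.length_set, hlen]; exact hj),
        List.getElem_set]
      by_cases hjm : m = j
      · subst hjm
        have h1 : m < m + 1 := by omega
        simp [hcm, h1]
      · rw [if_neg hjm, ← List.getD_eq_getElem _ 0 (by omega), ih]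
        by_cases hcj : c j
        · by_cases hjm' : j < m
          · have h1 : j < m + 1 := by omega
            simp [hcj, hjm', h1]
          · have h1 : ¬ (j < m + 1) := by omega
            simp [hcj, hjm', h1]
        · simp [hcj]
    · rename_i hcm
      rw [ih]
      by_cases hcj : c j
      · by_cases hjm' : j < m
        · have h1 : j < m + 1 := by omega
          simp [hcj, hjm', h1]
        · have hjq : ¬ j = m := by rintro rfl; exact hcm hcj
          have h1 : ¬ (j < m + 1) := by omega
          simp [hcj, hjm', h1]
      · simp [hcj]

lemma rowFold_eq_map (c : Nat → Prop) [DecidablePred c] (M : Nat) :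
    (List.range M).foldl (fun r j => if c j then r.set j 1 else r) (List.replicate M (0 : Int))
      = (List.range M).map (fun j => if c j then (1 : Int) else 0) := by
  apply List.ext_getElem
  · rw [foldl_length_invariant _ _ (by intro acc b; split <;> simp)]
    simp
  · intro j h1 h2
    have hj : j < M := by simpa using h2
    rw [← List.getD_eq_getElem _ 0 h1, ← List.getD_eq_getElem _ 0 h2,
      rowFold_getD _ _ _ _ (by simpa using hj)]
    simp only [List.getD_eq_getElem _ _ h2, List.getElem_map, List.getElem_range]
    by_cases hcj : c j <;> simp [hcj, hj]

-- the matrix-level inner loop only rewrites row i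
lemma matInner_eq_setRow (c : Nat → Prop) [DecidablePred c] (m : Nat)
    (res : List (List Int)) (i : Nat) (hi : i < res.length) :
    (List.range m).foldl
        (fun res j => if c j then res.set i ((res.getD i []).set j 1) else res) res
      = res.set i ((List.range m).foldl (fun r j => if c j then r.set j 1 else r)
          (res.getD i [])) := by
  induction m with
  | zero =>
    simp only [List.range_zero, List.foldl_nil]
    conv_rhs => rw [List.getD_eq_getElem _ _ hi]
    rw [List.set_getElem_self]
  | succ m ih =>
    rw [List.range_succ, List.foldl_append, List.foldl_append, ih]
    simp only [List.foldl_cons, List.foldl_nil]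
    have hget : (res.set i ((List.range m).foldl (fun r j => if c j then r.set j 1 else r)
        (res.getD i []))).getD i []
        = (List.range m).foldl (fun r j => if c j then r.set j 1 else r) (res.getD i []) := by
      rw [List.getD_eq_getElem _ _ (by simpa using hi), List.getElem_set]
      simp
    split
    · rw [hget, List.set_set]
    · rfl

-- the outer loop, row by row
lemma matFold_getD (c : Nat → Nat → Prop) [∀ i j, Decidable (c i j)] (M m : Nat)
    (res : List (List Int)) (hm : m ≤ res.length) (i : Nat) :
    ((List.range m).foldl (fun res i =>
        (List.range M).foldl
          (fun res j => if c i j then res.set i ((res.getD i []).set j 1) else res) res)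
        res).getD i []
      = if i < m
        then (List.range M).foldl (fun r j => if c i j then r.set j 1 else r) (res.getD i [])
        else res.getD i [] := by
  induction m with
  | zero => simp
  | succ m ih =>
    have hm' : m ≤ res.length := by omega
    have hlen : ((List.range m).foldl (fun res i =>
        (List.range M).foldl
          (fun res j => if c i j then res.set i ((res.getD i []).set j 1) else res) res)
        res).length = res.length := by
      refine foldl_length_invariant _ _ (fun acc b => ?_) res
      refine foldl_length_invariant _ _ (fun acc' b' => ?_) acc
      split <;> simp
    rw [List.range_succ, List.foldl_append]
    simp only [List.foldl_cons, List.foldl_nil]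
    rw [matInner_eq_setRow _ _ _ _ (by rw [hlen]; omega)]
    by_cases him : i = m
    · subst him
      rw [List.getD_eq_getElem _ _ (by rw [List.length_set, hlen]; omega), List.getElem_set]
      rw [if_pos rfl, if_pos (by omega)]
      rw [ih hm', if_neg (by omega)]
    · have hD : ∀ (xs : List (List Int)) (k : Nat), xs.getD k ([] : List Int) = (xs[k]?).getD [] := by
        intro xs k; rfl
      rw [hD, List.getElem?_set, if_neg (fun h => him h.symm), ← hD, ih hm']
      by_cases hi' : i < m
      · rw [if_pos hi', if_pos (by omega)]
      · rw [if_neg hi', if_neg (by omega)]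

-- matrix after both loops equals row i of the canonical grid, for i < M
lemma matFold_row (c : Nat → Nat → Prop) [∀ i j, Decidable (c i j)] (M : Nat) (i : Nat)
    (hi : i < M) :
    ((List.range M).foldl (fun res i =>
        (List.range M).foldl
          (fun res j => if c i j then res.set i ((res.getD i []).set j 1) else res) res)
        (List.replicate M (List.replicate M (0 : Int)))).getD i []
      = (List.range M).map (fun j => if c i j then (1 : Int) else 0) := by
  rw [matFold_getD c M M _ (by simp) i, if_pos hi,
    List.getD_eq_getElem _ _ (by simpa using hi), List.getElem_replicate, rowFold_eq_map]

-- zip of the two n-prefixes as a map over range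
lemma zip_take_map (u v : List Char) (M : Nat) (hu : M ≤ u.length) (hv : M ≤ v.length)
    (f : Char × Char → Char) :
    ((u.take M).zip (v.take M)).map f
      = (List.range M).map (fun j => f (u.getD j ' ', v.getD j ' ')) := by
  apply List.ext_getElem
  · simp; omega
  · intro j h1 h2
    have hj : j < M := by simpa using h2
    have hju : j < u.length := by omega
    have hjv : j < v.length := by omega
    simp only [List.getElem_map, List.getElem_zip, List.getElem_take, List.getElem_range]
    rw [List.getD_eq_getElem _ _ hju, List.getD_eq_getElem _ _ hjv]

lemma getD_map_binEntry (n : Int) (arr : List Int) (i : Nat) (hi : i < arr.length) :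
    (arr.map (binEntryA n)).getD i [] = binEntryA n (arr.getD i 0) := by
  rw [List.getD_eq_getElem _ _ (by simpa using hi), List.getElem_map,
    List.getD_eq_getElem _ _ hi]

-- row i of A's answer equals B's row
lemma row_eq (n : Int) (arr1 arr2 : List Int) (i : Nat) (hi : i < n.toNat)
    (h1 : n.toNat ≤ arr1.length) (h2 : n.toNat ≤ arr2.length) :
    (List.range n.toNat).map ((fun j => if j = 1 then '#' else ' ') ∘
        (fun j => if ((arr2.map (binEntryA n)).getD i []).getD j ' ' = '1'
                  ∨ ((arr1.map (binEntryA n)).getD i []).getD j ' ' = '1'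
                  then (1 : Int) else 0))
      = rowB n (arr1.getD i 0) (arr2.getD i 0) := by
  have hn : (0 : Int) ≤ n := by omega
  unfold rowB
  rw [← binEntryA_eq_zfill, ← binEntryA_eq_zfill,
    PySem.List.slice_to _ hn, PySem.List.slice_to _ hn,
    zip_take_map _ _ _ (length_binEntryA n _) (length_binEntryA n _),
    getD_map_binEntry n arr1 i (by omega), getD_map_binEntry n arr2 i (by omega)]
  apply List.map_congr_left
  intro j _
  simp only [Function.comp]
  by_cases ha : (binEntryA n (arr1[i]?.getD 0))[j]?.getD ' ' = '1' <;>
    by_cases hb : (binEntryA n (arr2[i]?.getD 0))[j]?.getD ' ' = '1' <;>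
      simp [ha, hb]

-- ===== VERDICT (by name: the statement is the Claim_ definition above) =====
theorem solution_spec : Claim_equal_solution := by
  intro n arr1 arr2 _hdom hpre
  obtain ⟨h1, h2⟩ := hpre
  have hM1 : n.toNat ≤ arr1.length := by omega
  have hM2 : n.toNat ≤ arr2.length := by omega
  unfold Spec_solution solution solution_alt
  simp only [PySem.List.foldl_append_singleton_eq_map, List.nil_append]
  apply List.ext_getElem
  · rw [List.length_map, List.length_map, List.length_range,
      foldl_length_invariant _ _ (fun acc b =>
        foldl_length_invariant _ _ (fun acc' b' => by split <;> simp) acc)]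
    simp
  · intro i hA hB
    have hi : i < n.toNat := by simpa using hB
    have hlen : ((List.range n.toNat).foldl (fun res i =>
        (List.range n.toNat).foldl (fun res j =>
          if ((arr2.map (binEntryA n)).getD i []).getD j ' ' = '1'
            ∨ ((arr1.map (binEntryA n)).getD i []).getD j ' ' = '1'
          then res.set i ((res.getD i []).set j 1) else res) res)
        (List.replicate n.toNat (List.replicate n.toNat (0 : Int)))).length
        = n.toNat := by
      rw [foldl_length_invariant _ _ (fun acc b =>
        foldl_length_invariant _ _ (fun acc' b' => by split <;> simp) acc)]
      simp
    simp only [List.getElem_map, List.getElem_range]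
    rw [← List.getD_eq_getElem _ [] (by rw [hlen]; exact hi)]
    rw [matFold_row (fun i j =>
        ((arr2.map (binEntryA n)).getD i []).getD j ' ' = '1'
        ∨ ((arr1.map (binEntryA n)).getD i []).getD j ' ' = '1') n.toNat i hi]
    rw [List.map_map, row_eq n arr1 arr2 i hi hM1 hM2]
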